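-- pv_equiv track=rewrite | github.com/SamuelFerrc/BeeCrowd | beecrowd.py | max_pontos_alberto
-- ===== SOURCE A (Python) =====
-- def max_pontos_alberto(cartas):
--     n = len(cartas)
--     dp = [[0] * n for _ in range(n)]
--
--     for i in range(n):
--         dp[i][i] = cartas[i]
--     for i in range(n - 1):
--         dp[i][i + 1] = max(cartas[i], cartas[i + 1])
--
--     for tamanho in range(3, n + 1):
--         for i in range(n - tamanho + 1):
--             j = i + tamanho - 1
--             esquerda = cartas[i] + min(dp[i + 2][j] if i + 2 <= j else 0, dp[i + 1][j - 1] if i + 1 <= j - 1 else 0)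
--             direita = cartas[j] + min(dp[i + 1][j - 1] if i + 1 <= j - 1 else 0, dp[i][j - 2] if i <= j - 2 else 0)
--             dp[i][j] = max(esquerda, direita)
--
--     return dp[0][n - 1]
-- ===== SOURCE B (Python) =====
-- def max_pontos_alberto(cartas):
--     # Top-down memoized recursion over intervals instead of A's bottom-up
--     # n x n table; only intervals actually reachable from [0, n-1] are computed
--     # (every recursive step shrinks the interval by exactly 2, so about half
--     # the table is never touched).
--     memo = {}
--
--     def solve(i, j):
--         key = (i, j)
--         if key in memo:
--             return memo[key]
--         if i == j:
--             r = cartas[i]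
--         elif j == i + 1:
--             r = max(cartas[i], cartas[j])
--         else:
--             esquerda = cartas[i] + min(solve(i + 2, j), solve(i + 1, j - 1))
--             direita = cartas[j] + min(solve(i + 1, j - 1), solve(i, j - 2))
--             r = max(esquerda, direita)
--         memo[key] = r
--         return r
--
--     return solve(0, len(cartas) - 1)
-- ===== Notes on version B (the rewrite author's own statement) =====
-- stated objective: alternative
-- what changed: Replaces A's bottom-up n-by-n interval-DP table filled by length with top-down memoized recursion solve(i,j) that only visits the intervals reachable from [0,n-1] (every step shrinks the interval by exactly 2, so about half the table is never computed).
import Mathlib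
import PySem

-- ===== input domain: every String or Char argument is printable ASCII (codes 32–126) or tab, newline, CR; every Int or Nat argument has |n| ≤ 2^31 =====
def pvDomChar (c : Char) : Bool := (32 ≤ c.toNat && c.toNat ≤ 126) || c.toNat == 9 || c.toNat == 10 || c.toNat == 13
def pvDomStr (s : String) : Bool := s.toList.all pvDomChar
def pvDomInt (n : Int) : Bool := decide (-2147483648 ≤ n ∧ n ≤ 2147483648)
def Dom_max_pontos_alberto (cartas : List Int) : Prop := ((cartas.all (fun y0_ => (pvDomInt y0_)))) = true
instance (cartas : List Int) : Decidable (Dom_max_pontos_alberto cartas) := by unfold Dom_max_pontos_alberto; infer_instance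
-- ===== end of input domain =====

-- B replaces A's bottom-up n×n interval-DP table with top-down memoized recursion
-- over intervals (same asymptotic cost; a different decomposition).

-- ===== PORT A =====
-- 2-D table access/update, exactly Python's dp[i][j] reads and writes (indices
-- are in range wherever A executes them, so getD's default is never returned).
def pvGet2 (dp : List (List Int)) (i j : Nat) : Int := (dp.getD i []).getD j 0
def pvSet2 (dp : List (List Int)) (i j : Nat) (v : Int) : List (List Int) :=
  dp.set i ((dp.getD i []).set j v)

def max_pontos_alberto (cartas : List Int) : Int :=
  let n := cartas.length
  let dp0 := List.replicate n (List.replicate n (0 : Int))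
  let dp1 := (List.range n).foldl (fun dp i => pvSet2 dp i i (cartas.getD i 0)) dp0
  let dp2 := (List.range (n - 1)).foldl
      (fun dp i => pvSet2 dp i (i + 1) (max (cartas.getD i 0) (cartas.getD (i + 1) 0))) dp1
  let dp3 := (List.range' 3 (n + 1 - 3)).foldl (fun dp tamanho =>
      (List.range (n - tamanho + 1)).foldl (fun dp i =>
        let j := i + tamanho - 1
        let esquerda := cartas.getD i 0 +
          min (if i + 2 ≤ j then pvGet2 dp (i + 2) j else 0)
              (if i + 1 ≤ j - 1 then pvGet2 dp (i + 1) (j - 1) else 0)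
        let direita := cartas.getD j 0 +
          min (if i + 1 ≤ j - 1 then pvGet2 dp (i + 1) (j - 1) else 0)
              (if i ≤ j - 2 then pvGet2 dp i (j - 2) else 0)
        pvSet2 dp i j (max esquerda direita)) dp) dp2
  pvGet2 dp3 0 (n - 1)

-- ===== PORT B =====
-- Source B's recursive solve(i, j), branch for branch (Source B's memo dict is a pure
-- cache and does not change any value, so it is dropped here); inside Pre_
-- all indices are natural and in range, so Nat indices with getD are exact.
-- The final 'else 0' arm is unreachable from solve(0, n-1) on non-empty input
-- (it makes the recursion total where Source B would diverge, outside Pre_).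
def pvSolveB (cartas : List Int) (i j : Nat) : Int :=
  if i = j then cartas.getD i 0
  else if j = i + 1 then max (cartas.getD i 0) (cartas.getD j 0)
  else if _h : i < j then
    let esquerda := cartas.getD i 0 +
      min (pvSolveB cartas (i + 2) j) (pvSolveB cartas (i + 1) (j - 1))
    let direita := cartas.getD j 0 +
      min (pvSolveB cartas (i + 1) (j - 1)) (pvSolveB cartas i (j - 2))
    max esquerda direita
  else 0
termination_by j - i
decreasing_by all_goals omega

def max_pontos_alberto_alt (cartas : List Int) : Int :=
  pvSolveB cartas 0 (cartas.length - 1)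

-- ===== PRECONDITION & SPEC =====
-- Pre_ excludes only the empty list, on which A raises IndexError (dp[0][n-1]).
def Pre_max_pontos_alberto (cartas : List Int) : Prop := cartas ≠ []
instance (cartas : List Int) : Decidable (Pre_max_pontos_alberto cartas) := by
  unfold Pre_max_pontos_alberto; infer_instance

def pvWitness_max_pontos_alberto : List Int := [3, 1, 4, 1, 5]

def Spec_max_pontos_alberto (cartas : List Int) (out : Int) : Prop := out = max_pontos_alberto_alt cartas
instance (cartas : List Int) (out : Int) : Decidable (Spec_max_pontos_alberto cartas out) := by unfold Spec_max_pontos_alberto; infer_instance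

-- ===== CLAIM (what is proved, stated in full; the proofs are below) =====
def Claim_equal_max_pontos_alberto : Prop := ∀ (cartas : List Int), Dom_max_pontos_alberto cartas → Pre_max_pontos_alberto cartas → Spec_max_pontos_alberto cartas (max_pontos_alberto cartas)

-- ===== LEMMAS AND PROOFS =====

lemma pvSolveB_self (cartas : List Int) (i : Nat) : pvSolveB cartas i i = cartas.getD i 0 := by
  rw [pvSolveB]; simp

lemma pvSolveB_adj (cartas : List Int) (i : Nat) :
    pvSolveB cartas i (i + 1) = max (cartas.getD i 0) (cartas.getD (i + 1) 0) := by
  rw [pvSolveB]; simp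

lemma pvSolveB_big (cartas : List Int) (i j : Nat) (h : i + 2 ≤ j) :
    pvSolveB cartas i j =
      max (cartas.getD i 0 + min (pvSolveB cartas (i + 2) j) (pvSolveB cartas (i + 1) (j - 1)))
          (cartas.getD j 0 + min (pvSolveB cartas (i + 1) (j - 1)) (pvSolveB cartas i (j - 2))) := by
  rw [pvSolveB]
  rw [if_neg (by omega), if_neg (by omega), dif_pos (by omega)]

-- ---- table (A-side) basics ----
def pvShape (dp : List (List Int)) (n : Nat) : Prop :=
  dp.length = n ∧ ∀ r, r < n → (dp.getD r []).length = n

lemma getD_set_self' (l : List Int) (i : Nat) (v : Int) (h : i < l.length) :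
    (l.set i v).getD i 0 = v := by
  simp [List.getD_eq_getElem?_getD, h]

lemma getD_set_ne' (l : List Int) (i k : Nat) (v : Int) (h : i ≠ k) :
    (l.set i v).getD k 0 = l.getD k 0 := by
  simp [List.getD_eq_getElem?_getD, List.getElem?_set_ne h]

lemma getD_set_self'' (l : List (List Int)) (i : Nat) (v : List Int) (h : i < l.length) :
    (l.set i v).getD i [] = v := by
  simp [List.getD_eq_getElem?_getD, h]

lemma getD_set_ne'' (l : List (List Int)) (i k : Nat) (v : List Int) (h : i ≠ k) :
    (l.set i v).getD k [] = l.getD k [] := by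
  simp [List.getD_eq_getElem?_getD, List.getElem?_set_ne h]

lemma pvShape_set2 (dp : List (List Int)) (n i j : Nat) (v : Int)
    (h : pvShape dp n) : pvShape (pvSet2 dp i j v) n := by
  obtain ⟨h1, h2⟩ := h
  refine ⟨by simp [pvSet2, h1], ?_⟩
  intro r hr
  by_cases hri : r = i
  · subst hri
    by_cases hlt : r < dp.length
    · rw [pvSet2, getD_set_self'' _ _ _ hlt, List.length_set]; exact h2 r hr
    · omega
  · rw [pvSet2, getD_set_ne'' _ _ _ _ (by omega)]; exact h2 r hr

lemma pvGet2_set2_same (dp : List (List Int)) (n i j : Nat) (v : Int)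
    (h : pvShape dp n) (hi : i < n) (hj : j < n) :
    pvGet2 (pvSet2 dp i j v) i j = v := by
  obtain ⟨h1, h2⟩ := h
  rw [pvGet2, pvSet2, getD_set_self'' _ _ _ (by omega), getD_set_self' _ _ _ (by rw [h2 i hi]; omega)]

lemma pvGet2_set2_ne (dp : List (List Int)) (r c i j : Nat) (v : Int)
    (h : r ≠ i ∨ c ≠ j) :
    pvGet2 (pvSet2 dp r c v) i j = pvGet2 dp i j := by
  rcases h with h | h
  · unfold pvGet2 pvSet2; rw [getD_set_ne'' _ _ _ _ h]
  · by_cases hri : r = i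
    · subst hri
      by_cases hlt : r < dp.length
      · unfold pvGet2 pvSet2; rw [getD_set_self'' _ _ _ hlt, getD_set_ne' _ _ _ _ h]
      · unfold pvSet2; rw [List.set_eq_of_length_le (by omega)]
    · unfold pvGet2 pvSet2; rw [getD_set_ne'' _ _ _ _ hri]

-- invariant carried through A's loops: the table holds pvSolveB on all intervals
-- of length ≤ t that fit below n
def pvInv (cartas : List Int) (dp : List (List Int)) (t : Nat) : Prop :=
  pvShape dp cartas.length ∧
    ∀ i j, i ≤ j → j < cartas.length → j + 1 ≤ i + t → pvGet2 dp i j = pvSolveB cartas i j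

lemma loop1_inv (cartas : List Int) : ∀ m, m ≤ cartas.length →
    pvShape ((List.range m).foldl (fun dp i => pvSet2 dp i i (cartas.getD i 0))
      (List.replicate cartas.length (List.replicate cartas.length (0 : Int)))) cartas.length ∧
    ∀ i, i < m → pvGet2 ((List.range m).foldl (fun dp i => pvSet2 dp i i (cartas.getD i 0))
      (List.replicate cartas.length (List.replicate cartas.length (0 : Int)))) i i
      = cartas.getD i 0 := by
  intro m
  induction m with
  | zero =>
    intro _
    refine ⟨⟨by simp, fun r hr => ?_⟩, fun i hi => by omega⟩
    simp [List.getD_eq_getElem?_getD, hr]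
  | succ m ih =>
    intro hm
    obtain ⟨ihs, ihv⟩ := ih (by omega)
    rw [List.range_succ, List.foldl_append, List.foldl_cons, List.foldl_nil]
    refine ⟨pvShape_set2 _ _ _ _ _ ihs, fun i hi => ?_⟩
    by_cases him : i = m
    · subst him
      exact pvGet2_set2_same _ _ _ _ _ ihs (by omega) (by omega)
    · rw [pvGet2_set2_ne _ _ _ _ _ _ (Or.inl (by omega))]
      exact ihv i (by omega)

lemma loop2_inv (cartas : List Int) :
    pvInv cartas ((List.range (cartas.length - 1)).foldl
      (fun dp i => pvSet2 dp i (i + 1) (max (cartas.getD i 0) (cartas.getD (i + 1) 0)))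
      ((List.range cartas.length).foldl (fun dp i => pvSet2 dp i i (cartas.getD i 0))
        (List.replicate cartas.length (List.replicate cartas.length (0 : Int))))) 2 := by
  obtain ⟨h1s, h1v⟩ := loop1_inv cartas cartas.length (le_refl _)
  suffices h : ∀ m, m ≤ cartas.length - 1 →
      pvShape ((List.range m).foldl
        (fun dp i => pvSet2 dp i (i + 1) (max (cartas.getD i 0) (cartas.getD (i + 1) 0)))
        ((List.range cartas.length).foldl (fun dp i => pvSet2 dp i i (cartas.getD i 0))
          (List.replicate cartas.length (List.replicate cartas.length (0 : Int))))) cartas.length ∧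
      (∀ i, i < cartas.length → pvGet2 ((List.range m).foldl
        (fun dp i => pvSet2 dp i (i + 1) (max (cartas.getD i 0) (cartas.getD (i + 1) 0)))
        ((List.range cartas.length).foldl (fun dp i => pvSet2 dp i i (cartas.getD i 0))
          (List.replicate cartas.length (List.replicate cartas.length (0 : Int))))) i i
        = cartas.getD i 0) ∧
      (∀ i, i < m → pvGet2 ((List.range m).foldl
        (fun dp i => pvSet2 dp i (i + 1) (max (cartas.getD i 0) (cartas.getD (i + 1) 0)))
        ((List.range cartas.length).foldl (fun dp i => pvSet2 dp i i (cartas.getD i 0))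
          (List.replicate cartas.length (List.replicate cartas.length (0 : Int))))) i (i + 1)
        = max (cartas.getD i 0) (cartas.getD (i + 1) 0)) by
    obtain ⟨hs, hd, ha⟩ := h (cartas.length - 1) (le_refl _)
    refine ⟨hs, fun i j hij hj hle => ?_⟩
    by_cases hji : j = i
    · subst hji; rw [pvSolveB_self]; exact hd j hj
    · have hj1 : j = i + 1 := by omega
      subst hj1
      rw [pvSolveB_adj]; exact ha i (by omega)
  intro m
  induction m with
  | zero =>
    intro _
    exact ⟨h1s, fun i hi => h1v i hi, fun i hi => by omega⟩
  | succ m ih =>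
    intro hm
    obtain ⟨ihs, ihd, iha⟩ := ih (by omega)
    rw [List.range_succ, List.foldl_append, List.foldl_cons, List.foldl_nil]
    refine ⟨pvShape_set2 _ _ _ _ _ ihs, fun i hi => ?_, fun i hi => ?_⟩
    · by_cases him : i = m
      · rw [pvGet2_set2_ne _ _ _ _ _ _ (Or.inr (by omega))]
        exact ihd i hi
      · rw [pvGet2_set2_ne _ _ _ _ _ _ (Or.inl (by omega))]
        exact ihd i hi
    · by_cases him : i = m
      · subst him
        exact pvGet2_set2_same _ _ _ _ _ ihs (by omega) (by omega)
      · rw [pvGet2_set2_ne _ _ _ _ _ _ (Or.inl (by omega))]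
        exact iha i (by omega)

lemma loop3_step (cartas : List Int) (dp : List (List Int)) (tamanho : Nat)
    (h3 : 3 ≤ tamanho) (hn : tamanho ≤ cartas.length)
    (hinv : pvInv cartas dp (tamanho - 1)) :
    pvInv cartas ((List.range (cartas.length - tamanho + 1)).foldl (fun dp i =>
        let j := i + tamanho - 1
        let esquerda := cartas.getD i 0 +
          min (if i + 2 ≤ j then pvGet2 dp (i + 2) j else 0)
              (if i + 1 ≤ j - 1 then pvGet2 dp (i + 1) (j - 1) else 0)
        let direita := cartas.getD j 0 +
          min (if i + 1 ≤ j - 1 then pvGet2 dp (i + 1) (j - 1) else 0)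
              (if i ≤ j - 2 then pvGet2 dp i (j - 2) else 0)
        pvSet2 dp i j (max esquerda direita)) dp) tamanho := by
  obtain ⟨hs0, hold0⟩ := hinv
  suffices h : ∀ m, m ≤ cartas.length - tamanho + 1 →
      pvShape ((List.range m).foldl (fun dp i =>
        let j := i + tamanho - 1
        let esquerda := cartas.getD i 0 +
          min (if i + 2 ≤ j then pvGet2 dp (i + 2) j else 0)
              (if i + 1 ≤ j - 1 then pvGet2 dp (i + 1) (j - 1) else 0)
        let direita := cartas.getD j 0 +
          min (if i + 1 ≤ j - 1 then pvGet2 dp (i + 1) (j - 1) else 0)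
              (if i ≤ j - 2 then pvGet2 dp i (j - 2) else 0)
        pvSet2 dp i j (max esquerda direita)) dp) cartas.length ∧
      (∀ i j, i ≤ j → j < cartas.length → j + 1 ≤ i + (tamanho - 1) →
        pvGet2 ((List.range m).foldl (fun dp i =>
        let j := i + tamanho - 1
        let esquerda := cartas.getD i 0 +
          min (if i + 2 ≤ j then pvGet2 dp (i + 2) j else 0)
              (if i + 1 ≤ j - 1 then pvGet2 dp (i + 1) (j - 1) else 0)
        let direita := cartas.getD j 0 +
          min (if i + 1 ≤ j - 1 then pvGet2 dp (i + 1) (j - 1) else 0)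
              (if i ≤ j - 2 then pvGet2 dp i (j - 2) else 0)
        pvSet2 dp i j (max esquerda direita)) dp) i j = pvSolveB cartas i j) ∧
      (∀ i, i < m →
        pvGet2 ((List.range m).foldl (fun dp i =>
        let j := i + tamanho - 1
        let esquerda := cartas.getD i 0 +
          min (if i + 2 ≤ j then pvGet2 dp (i + 2) j else 0)
              (if i + 1 ≤ j - 1 then pvGet2 dp (i + 1) (j - 1) else 0)
        let direita := cartas.getD j 0 +
          min (if i + 1 ≤ j - 1 then pvGet2 dp (i + 1) (j - 1) else 0)
              (if i ≤ j - 2 then pvGet2 dp i (j - 2) else 0)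
        pvSet2 dp i j (max esquerda direita)) dp) i (i + tamanho - 1)
        = pvSolveB cartas i (i + tamanho - 1)) by
    obtain ⟨hs, hold, hnew⟩ := h (cartas.length - tamanho + 1) (le_refl _)
    refine ⟨hs, fun i j hij hj hle => ?_⟩
    by_cases hsmall : j + 1 ≤ i + (tamanho - 1)
    · exact hold i j hij hj hsmall
    · obtain rfl : j = i + tamanho - 1 := by omega
      exact hnew i (by omega)
  intro m
  induction m with
  | zero =>
    intro _
    exact ⟨hs0, fun i j hij hj hle => hold0 i j hij hj hle, fun i hi => by omega⟩
  | succ m ih =>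
    intro hm
    obtain ⟨ihs, ihold, ihnew⟩ := ih (by omega)
    rw [List.range_succ, List.foldl_append, List.foldl_cons, List.foldl_nil]
    simp only []
    rw [if_pos (show m + 2 ≤ m + tamanho - 1 by omega),
        if_pos (show m + 1 ≤ m + tamanho - 1 - 1 by omega),
        if_pos (show m ≤ m + tamanho - 1 - 2 by omega),
        ihold (m + 2) (m + tamanho - 1) (by omega) (by omega) (by omega),
        ihold (m + 1) (m + tamanho - 1 - 1) (by omega) (by omega) (by omega),
        ihold m (m + tamanho - 1 - 2) (by omega) (by omega) (by omega),
        ← pvSolveB_big cartas m (m + tamanho - 1) (by omega)]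
    refine ⟨pvShape_set2 _ _ _ _ _ ihs, fun i j hij hj hle => ?_, fun i hi => ?_⟩
    · by_cases him : i = m
      · rw [pvGet2_set2_ne _ _ _ _ _ _ (Or.inr (by omega))]
        exact ihold i j hij hj hle
      · rw [pvGet2_set2_ne _ _ _ _ _ _ (Or.inl (by omega))]
        exact ihold i j hij hj hle
    · by_cases him : i = m
      · subst him
        exact pvGet2_set2_same _ _ _ _ _ ihs (by omega) (by omega)
      · rw [pvGet2_set2_ne _ _ _ _ _ _ (Or.inl (by omega))]
        exact ihnew i (by omega)

lemma loop3_all (cartas : List Int) : ∀ m, m + 2 ≤ cartas.length →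
    pvInv cartas ((List.range' 3 m).foldl (fun dp tamanho =>
      (List.range (cartas.length - tamanho + 1)).foldl (fun dp i =>
        let j := i + tamanho - 1
        let esquerda := cartas.getD i 0 +
          min (if i + 2 ≤ j then pvGet2 dp (i + 2) j else 0)
              (if i + 1 ≤ j - 1 then pvGet2 dp (i + 1) (j - 1) else 0)
        let direita := cartas.getD j 0 +
          min (if i + 1 ≤ j - 1 then pvGet2 dp (i + 1) (j - 1) else 0)
              (if i ≤ j - 2 then pvGet2 dp i (j - 2) else 0)
        pvSet2 dp i j (max esquerda direita)) dp)
      ((List.range (cartas.length - 1)).foldl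
        (fun dp i => pvSet2 dp i (i + 1) (max (cartas.getD i 0) (cartas.getD (i + 1) 0)))
        ((List.range cartas.length).foldl (fun dp i => pvSet2 dp i i (cartas.getD i 0))
          (List.replicate cartas.length (List.replicate cartas.length (0 : Int)))))) (m + 2) := by
  intro m
  induction m with
  | zero =>
    intro _
    simpa using loop2_inv cartas
  | succ m ih =>
    intro hm
    rw [show List.range' 3 (m + 1) = List.range' 3 m ++ [3 + m] from by
          simpa using List.range'_concat (s := 3) (n := m) (step := 1),
        List.foldl_append, List.foldl_cons, List.foldl_nil,
        show m + 1 + 2 = 3 + m from by omega]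
    have hprev := ih (by omega)
    rw [show m + 2 = 3 + m - 1 from by omega] at hprev
    exact loop3_step cartas _ (3 + m) (by omega) (by omega) hprev

lemma portA_eq_solve (cartas : List Int) (h : cartas ≠ []) :
    max_pontos_alberto cartas = pvSolveB cartas 0 (cartas.length - 1) := by
  have hn : 1 ≤ cartas.length := List.length_pos_of_ne_nil h
  unfold max_pontos_alberto
  simp only []
  by_cases hbig : 3 ≤ cartas.length
  · rw [show cartas.length + 1 - 3 = cartas.length - 2 from by omega]
    obtain ⟨_, hv⟩ := loop3_all cartas (cartas.length - 2) (by omega)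
    rw [hv 0 (cartas.length - 1) (by omega) (by omega) (by omega)]
  · rw [show cartas.length + 1 - 3 = 0 from by omega, List.range'_zero, List.foldl_nil]
    obtain ⟨_, hv⟩ := loop2_inv cartas
    rw [hv 0 (cartas.length - 1) (by omega) (by omega) (by omega)]

-- ===== VERDICT (by name: the statement is the Claim_ definition above) =====
theorem max_pontos_alberto_spec : Claim_equal_max_pontos_alberto := by
  intro cartas _ hpre
  unfold Spec_max_pontos_alberto max_pontos_alberto_alt
  rw [portA_eq_solve cartas hpre]
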